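-- pv_equiv track=rewrite | github.com/smzn/CloseQueue_lib | ClosedQueue_StationaryDistribution.py | getCombi
-- ===== SOURCE A (Python) =====
-- import itertools #重複組合せを求める
--
-- def getCombi(N,K):
--     #s = combinations_count(N, K)#重複組み合わせ
--     l = [i for i in range(N)]
--     p_list = list(itertools.combinations_with_replacement(l, K))
--     combi = [[0 for i in range(N)] for j in range(len(p_list))]
--     for ind, p in enumerate(p_list):
--         for k in range(K):
--             combi[ind][p[k]] += 1
--     return combi
-- ===== SOURCE B (Python) =====
-- def getCombi(N, K):
--     # stars-and-bars: emit count vectors directly, recursing only on the next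
--     # NONZERO bin (a zero-prefix of length z, then a count c from r down to 1);
--     # this preserves combinations_with_replacement's lexicographic order.
--     n = N if N > 0 else 0
--     def gen(bins, r):
--         if r == 0:
--             return [[0] * bins]
--         if bins == 0:
--             return []
--         return [[0] * z + [c] + rest
--                 for z in range(bins)
--                 for c in range(r, 0, -1)
--                 for rest in gen(bins - z - 1, r - c)]
--     return gen(n, K)
-- ===== Notes on version B (the rewrite author's own statement) =====
-- stated objective: alternative
-- what changed: Replaces itertools.combinations_with_replacement plus a counting pass over each tuple by a direct stars-and-bars recursion over the bins that emits the count vectors themselves (descending per-bin count preserves the lexicographic order).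
import Mathlib
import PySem

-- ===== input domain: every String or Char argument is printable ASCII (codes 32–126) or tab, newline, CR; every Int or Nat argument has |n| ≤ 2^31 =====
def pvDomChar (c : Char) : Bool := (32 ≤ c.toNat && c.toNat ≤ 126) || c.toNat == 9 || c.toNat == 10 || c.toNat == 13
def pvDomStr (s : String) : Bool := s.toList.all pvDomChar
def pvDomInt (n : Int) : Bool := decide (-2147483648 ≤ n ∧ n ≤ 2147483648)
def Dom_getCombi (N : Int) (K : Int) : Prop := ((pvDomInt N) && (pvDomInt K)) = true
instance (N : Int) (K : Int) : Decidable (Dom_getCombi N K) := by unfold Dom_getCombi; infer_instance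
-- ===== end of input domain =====

-- B replaces itertools tuple generation + counting by a direct stars-and-bars
-- recursion over the bins (an alternative decomposition, not claimed faster).

-- ===== PORT A =====
-- itertools.combinations_with_replacement(l, k): lexicographic non-decreasing
-- k-tuples from l; ported step-for-step by the standard recursion (exact).
def pyCWR (l : List Int) (k : Nat) : List (List Int) :=
  match k, l with
  | 0, _ => [[]]
  | k + 1, [] => []
  | k + 1, x :: xs => (pyCWR (x :: xs) k).map (x :: ·) ++ pyCWR xs (k + 1)
termination_by l.length + k

-- combi[ind][p[k]] += 1 (index always in range in A)
def incAt (v : List Int) (j : Nat) : List Int := v.set j (v.getD j 0 + 1)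

def getCombi (N : Int) (K : Int) : List (List Int) :=
  let l := PySem.List.pyRange 0 N 1
  let p_list := pyCWR l K.toNat
  p_list.map (fun p =>
    (PySem.List.pyRange 0 K 1).foldl
      (fun v k => incAt v (PySem.List.pyGetD p k 0).toNat)
      (List.replicate N.toNat 0))

-- ===== PORT B =====
-- gen(bins, r): a zero-prefix of length z, then a nonzero count c (descending
-- r..1) for the next bin; recursion only on the nonzero bins.
-- (attach is termination scaffolding only: c ∈ range(r,0,-1) gives r - c < r)
def genB2 (bins : Nat) (r : Int) : List (List Int) :=
  if r = 0 then [List.replicate bins (0 : Int)]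
  else
    match bins with
    | 0 => []
    | b + 1 =>
      (List.range (b + 1)).flatMap (fun z =>
        (PySem.List.pyRange r 0 (-1)).attach.flatMap (fun c =>
          (genB2 (b + 1 - z - 1) (r - c.1)).map
            (fun rest => List.replicate z (0 : Int) ++ c.1 :: rest)))
termination_by r.toNat
decreasing_by
  have h := PySem.List.mem_pyRange_neg_one.1 c.2
  omega

def getCombi_alt (N : Int) (K : Int) : List (List Int) :=
  genB2 (if N > 0 then N else 0).toNat K

-- ===== PRECONDITION & SPEC =====
-- A raises ValueError for K < 0 (combinations_with_replacement); excluded.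
def Pre_getCombi (N : Int) (K : Int) : Prop := 0 ≤ K
instance (N : Int) (K : Int) : Decidable (Pre_getCombi N K) := by unfold Pre_getCombi; infer_instance
def pvWitness_getCombi : Int × Int := (2, 2)

def Spec_getCombi (N : Int) (K : Int) (out : List (List Int)) : Prop := out = getCombi_alt N K
instance (N : Int) (K : Int) (out : List (List Int)) : Decidable (Spec_getCombi N K out) := by unfold Spec_getCombi; infer_instance

-- ===== CLAIM (what is proved, stated in full; the proofs are below) =====
def Claim_equal_getCombi : Prop := ∀ (N : Int) (K : Int), Dom_getCombi N K → Pre_getCombi N K → Spec_getCombi N K (getCombi N K)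

-- ===== LEMMAS AND PROOFS =====

-- proof-side intermediate: plain one-bin-at-a-time stars-and-bars
def genB (bins : Nat) (r : Int) : List (List Int) :=
  match bins with
  | 0 => if r = 0 then [[]] else []
  | b + 1 => (PySem.List.pyRange r (-1) (-1)).flatMap
      (fun c => (genB b (r - c)).map (c :: ·))

theorem genB2_succ_eq (b : Nat) (r : Int) (hr : ¬ r = 0) :
    genB2 (b + 1) r = (List.range (b + 1)).flatMap (fun z =>
      (PySem.List.pyRange r 0 (-1)).flatMap (fun c =>
        (genB2 (b - z) (r - c)).map
          (fun rest => List.replicate z (0 : Int) ++ c :: rest))) := by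
  rw [genB2]
  simp [hr, show ∀ z : Nat, b + 1 - z - 1 = b - z from fun z => by omega]

theorem pyRange_neg_one_split (r : Int) (hr : 0 ≤ r) :
    PySem.List.pyRange r (-1) (-1) = PySem.List.pyRange r 0 (-1) ++ [0] := by
  rw [PySem.List.pyRange_neg_one_eq_reverse, PySem.List.pyRange_neg_one_eq_reverse,
    show (-1 : Int) + 1 = 0 from rfl, show (0 : Int) + 1 = 1 from rfl,
    PySem.List.pyRange_one_cons (by omega : (0 : Int) < r + 1)]
  simp

theorem genB_zero (b : Nat) : genB b 0 = [List.replicate b (0 : Int)] := by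
  induction b with
  | zero => simp [genB]
  | succ b ih =>
    rw [genB, show PySem.List.pyRange 0 (-1) (-1) = [0] by decide]
    simp [ih, List.replicate_succ]

theorem genB_neg (b : Nat) (r : Int) (hr : r < 0) : genB b r = [] := by
  cases b with
  | zero => simp [genB]; omega
  | succ b =>
    rw [genB, PySem.List.pyRange_neg_one_eq_nil (by omega)]
    simp

theorem genB2_neg (b : Nat) (r : Int) (hr : r < 0) : genB2 b r = [] := by
  cases b with
  | zero => rw [genB2]; simp; omega
  | succ b =>
    rw [genB2_succ_eq b r (by omega), PySem.List.pyRange_neg_one_eq_nil (by omega)]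
    simp

theorem genB2_eq_genB (fuel : Nat) (r : Int) (hfuel : r.toNat ≤ fuel) (b : Nat) :
    genB2 b r = genB b r := by
  induction fuel generalizing r b with
  | zero =>
    rcases lt_trichotomy r 0 with h | h | h
    · rw [genB2_neg b r h, genB_neg b r h]
    · subst h; rw [genB2.eq_def, genB_zero]; simp
    · omega
  | succ fuel ihf =>
    rcases lt_trichotomy r 0 with h | h | h
    · rw [genB2_neg b r h, genB_neg b r h]
    · subst h; rw [genB2.eq_def, genB_zero]; simp
    · induction b with
      | zero => rw [genB2.eq_def, genB]; simp [show ¬ (r = 0) from by omega]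
      | succ b ihb =>
        rw [genB2_succ_eq b r (by omega), genB,
          pyRange_neg_one_split r (by omega), List.flatMap_append,
          List.range_succ_eq_map, List.flatMap_cons, List.flatMap_map]
        congr 1
        · -- z = 0 block vs the c = r..1 part
          simp only [Nat.sub_zero, List.replicate_zero, List.nil_append]
          apply List.flatMap_congr
          intro c hc
          have hcr := PySem.List.mem_pyRange_neg_one.1 hc
          rw [ihf (r - c) (by omega) b]
        · -- z ≥ 1 block vs the c = 0 term (prefix zeros = 0 :: shorter prefix)
          have htail : ∀ z ∈ List.range b,
              (PySem.List.pyRange r 0 (-1)).flatMap (fun c =>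
                (genB2 (b - (z + 1)) (r - c)).map
                  (fun rest => List.replicate (z + 1) (0 : Int) ++ c :: rest))
              = List.map (fun v => (0 : Int) :: v)
                  ((PySem.List.pyRange r 0 (-1)).flatMap (fun c =>
                    (genB2 (b - 1 - z) (r - c)).map
                      (fun rest => List.replicate z (0 : Int) ++ c :: rest))) := by
            intro z hz
            rw [List.map_flatMap]
            apply List.flatMap_congr
            intro c hc
            rw [List.map_map, show b - (z + 1) = b - 1 - z by omega]
            apply List.map_congr_left
            intro rest _
            simp [List.replicate_succ]
          rw [List.flatMap_congr htail, ← List.map_flatMap]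
          cases b with
          | zero =>
            simp only [List.range_zero, List.flatMap_nil, List.map_nil,
              List.flatMap_cons, List.append_nil, sub_zero]
            rw [show genB 0 r = [] from by rw [genB]; simp; omega]
            simp
          | succ b' =>
            rw [show List.flatMap (fun z => (PySem.List.pyRange r 0 (-1)).flatMap fun c =>
                  List.map (fun rest => List.replicate z (0 : Int) ++ c :: rest)
                    (genB2 (b' + 1 - 1 - z) (r - c))) (List.range (b' + 1))
                = genB2 (b' + 1) r from by
              rw [genB2_succ_eq b' r (by omega)]
              simp [show ∀ z : Nat, b' + 1 - 1 - z = b' - z from fun z => by omega]]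
            rw [ihb]
            simp


-- count vector of p over the n consecutive values a, a+1, …, a+n-1
def cvf (a : Int) (n : Nat) (p : List Int) : List Int :=
  match n with
  | 0 => []
  | n + 1 => ((p.count a : Nat) : Int) :: cvf (a + 1) n p

theorem length_cvf (a : Int) (n : Nat) (p : List Int) : (cvf a n p).length = n := by
  induction n generalizing a with
  | zero => rfl
  | succ n ih => simp [cvf, ih]

theorem getElem_cvf (a : Int) (n : Nat) (p : List Int) (j : Nat) (hj : j < n)
    (hjl : j < (cvf a n p).length) :
    (cvf a n p)[j] = ((p.count (a + j) : Nat) : Int) := by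
  induction n generalizing a j with
  | zero => omega
  | succ n ih =>
    cases j with
    | zero => simp [cvf]
    | succ j =>
      have := ih (a + 1) j (by omega) (by simpa [length_cvf] using (by omega : j < n))
      simpa [cvf, add_assoc, add_comm, add_left_comm] using this

theorem cvf_shift (a b : Int) (n : Nat) (c : Nat) (q : List Int) (hab : a < b) :
    cvf b n (List.replicate c a ++ q) = cvf b n q := by
  induction n generalizing b with
  | zero => rfl
  | succ n ih =>
    have hne : a ≠ b := by omega
    simp only [cvf]
    rw [ih (b + 1) (by omega)]
    simp [List.count_append, List.count_replicate, hne]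

theorem cvf_replicate_append (a : Int) (n : Nat) (c : Nat) (q : List Int)
    (hq : ∀ x ∈ q, a < x) :
    cvf a (n + 1) (List.replicate c a ++ q) = ((c : Int)) :: cvf (a + 1) n q := by
  have h0 : q.count a = 0 := List.count_eq_zero.2 (fun hmem => by
    have := hq a hmem; omega)
  simp [cvf, List.count_append, List.count_replicate, h0,
    cvf_shift a (a + 1) n c q (by omega)]

-- members of pyCWR l k are k-tuples over l
theorem pyCWR_mem_length (l : List Int) (k : Nat) :
    ∀ p ∈ pyCWR l k, p.length = k := by
  induction l, k using pyCWR.induct with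
  | case1 l => intro p hp; simp [pyCWR] at hp; simp [hp]
  | case2 k => intro p hp; simp [pyCWR] at hp
  | case3 k x xs ih1 ih2 =>
    intro p hp
    simp only [pyCWR, List.mem_append, List.mem_map] at hp
    rcases hp with ⟨q, hq, rfl⟩ | hp
    · simp [ih1 q hq]
    · exact ih2 p hp

theorem pyCWR_mem_mem (l : List Int) (k : Nat) :
    ∀ p ∈ pyCWR l k, ∀ x ∈ p, x ∈ l := by
  induction l, k using pyCWR.induct with
  | case1 l => intro p hp x hx; simp [pyCWR] at hp; subst hp; simp at hx
  | case2 k => intro p hp; simp [pyCWR] at hp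
  | case3 k y xs ih1 ih2 =>
    intro p hp x hx
    simp only [pyCWR, List.mem_append, List.mem_map] at hp
    rcases hp with ⟨q, hq, rfl⟩ | hp
    · rcases List.mem_cons.1 hx with rfl | hx
      · simp
      · exact ih1 q hq x hx
    · exact List.mem_cons_of_mem _ (ih2 p hp x hx)

-- the split lemma: tuples over a::xs, grouped by the multiplicity of a (descending)
theorem pyCWR_cons_split (a : Int) (xs : List Int) (k : Nat) :
    pyCWR (a :: xs) k =
      (List.range (k + 1)).flatMap
        (fun j => (pyCWR xs j).map (fun q => List.replicate (k - j) a ++ q)) := by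
  induction k with
  | zero => simp [pyCWR]
  | succ k ih =>
    rw [pyCWR, ih]
    conv_rhs => rw [List.range_succ, List.flatMap_append]
    congr 1
    · rw [List.map_flatMap]
      apply List.flatMap_congr
      intro j hj
      have hjk : j ≤ k := Nat.lt_succ_iff.1 (List.mem_range.1 hj)
      rw [List.map_map]
      apply List.map_congr_left
      intro q _
      simp only [Function.comp]
      rw [show k + 1 - j = (k - j) + 1 by omega, List.replicate_succ]
      simp
    · simp

-- fold of increments = pointwise counts
theorem incAt_getD (v : List Int) (i j : Nat) (hi : i < v.length) :
    (incAt v i).getD j 0 = if i = j then v.getD j 0 + 1 else v.getD j 0 := by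
  unfold incAt
  rw [List.getD_eq_getElem?_getD, List.getElem?_set, List.getD_eq_getElem?_getD,
    List.getD_eq_getElem?_getD]
  by_cases h : i = j
  · subst h; simp [hi, List.getElem?_eq_getElem hi]
  · simp [h]

theorem foldl_incAt_length (p : List Int) (v : List Int) :
    (p.foldl (fun v x => incAt v x.toNat) v).length = v.length := by
  induction p generalizing v with
  | nil => rfl
  | cons x p ih =>
    rw [List.foldl_cons, ih]
    simp [incAt]

theorem foldl_incAt_getD (p : List Int) (v : List Int) (j : Nat)
    (hj : j < v.length) (hb : ∀ x ∈ p, 0 ≤ x ∧ x.toNat < v.length) :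
    (p.foldl (fun v x => incAt v x.toNat) v).getD j 0
      = v.getD j 0 + ((p.count (j : Int) : Nat) : Int) := by
  induction p generalizing v with
  | nil => simp
  | cons x p ih =>
    obtain ⟨hx0, hxl⟩ := hb x (List.mem_cons_self)
    have hlen : (incAt v x.toNat).length = v.length := by simp [incAt]
    have := ih (incAt v x.toNat) (by omega)
      (fun y hy => by have := hb y (List.mem_cons_of_mem _ hy); omega)
    rw [List.foldl_cons, this, incAt_getD v x.toNat j hxl]
    by_cases hxy : x.toNat = j
    · have hxj : x = (j : Int) := by omega
      simp [hxy, List.count_cons, hxj]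
      ring
    · have hxj : ¬ (x = (j : Int)) := by omega
      simp [hxy, List.count_cons, hxj]

theorem row_eq_cvf (n : Nat) (p : List Int)
    (hb : ∀ x ∈ p, 0 ≤ x ∧ x.toNat < n) :
    p.foldl (fun v x => incAt v x.toNat) (List.replicate n (0 : Int)) = cvf 0 n p := by
  apply List.ext_getElem
  · simp [foldl_incAt_length, length_cvf]
  · intro j hj1 hj2
    have hjn : j < n := by simpa [length_cvf] using hj2
    have h1 := foldl_incAt_getD p (List.replicate n (0 : Int)) j (by simpa using hjn)
      (by simpa using hb)
    have h2 := getElem_cvf 0 n p j hjn hj2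
    rw [List.getD_eq_getElem?_getD, List.getElem?_eq_getElem hj1] at h1
    simp only [Option.getD_some] at h1
    rw [h1, h2]
    simp

-- main combinatorial lemma
theorem map_cvf_pyCWR (n : Nat) (a : Int) (k : Nat) :
    (pyCWR (PySem.List.pyRange a (a + n) 1) k).map (cvf a n) = genB n (k : Int) := by
  induction n generalizing a k with
  | zero =>
    rw [PySem.List.pyRange_one_eq_nil (by omega)]
    cases k with
    | zero => simp [pyCWR, genB, cvf]
    | succ k =>
      have : ((k : Int) + 1 ≠ 0) := by omega
      simp [pyCWR, genB, Nat.cast_add, this]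
  | succ n ih =>
    rw [PySem.List.pyRange_one_cons (by omega : a < a + (n + 1 : Nat)),
      pyCWR_cons_split]
    have hrest : PySem.List.pyRange (a + 1) (a + (n + 1 : Nat)) 1
        = PySem.List.pyRange (a + 1) ((a + 1) + (n : Nat)) 1 := by
      congr 1; push_cast; ring
    rw [hrest]
    -- LHS: map over flatMap
    rw [List.map_flatMap]
    -- RHS: unfold genB, rewrite the countdown range
    rw [show genB (n + 1) (k : Int)
        = (PySem.List.pyRange (k : Int) (-1) (-1)).flatMap
            (fun c => (genB n ((k : Int) - c)).map (c :: ·)) from rfl,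
      PySem.List.pyRange_neg_one]
    have hk1 : ((k : Int) - (-1)).toNat = k + 1 := by omega
    rw [hk1, List.flatMap_map]
    apply List.flatMap_congr ?_
    intro j hj
    have hjk : j ≤ k := Nat.lt_succ_iff.1 (List.mem_range.1 hj)
    have hsub : (k : Int) - ((k : Int) - (j : Nat)) = (j : Nat) := by ring
    rw [hsub, ← ih (a + 1) j, List.map_map, List.map_map]
    apply List.map_congr_left
    intro q hq
    have hmem : ∀ x ∈ q, a < x := by
      intro x hx
      have := pyCWR_mem_mem _ _ q hq x hx
      have := (PySem.List.mem_pyRange_one.1 this).1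
      omega
    have := cvf_replicate_append a n (k - j) q hmem
    have hcast : (((k - j : Nat) : Int)) = (k : Int) - (j : Nat) := by omega
    simp only [Function.comp]
    rw [this, hcast]

theorem pyRange_toNat (N : Int) :
    PySem.List.pyRange 0 N 1 = PySem.List.pyRange 0 ((N.toNat : Int)) 1 := by
  rcases le_or_gt N 0 with h | h
  · rw [PySem.List.pyRange_one_eq_nil h, PySem.List.pyRange_one_eq_nil (by omega)]
  · congr 1; omega

-- ===== VERDICT (by name: the statement is the Claim_ definition above) =====
theorem getCombi_spec : Claim_equal_getCombi := by
  intro N K _ hK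
  unfold Pre_getCombi at hK
  unfold Spec_getCombi getCombi getCombi_alt
  simp only []
  have hmax : (if N > 0 then N else 0).toNat = N.toNat := by split <;> omega
  rw [hmax]
  have hrow : ∀ p ∈ pyCWR (PySem.List.pyRange 0 N 1) K.toNat,
      (PySem.List.pyRange 0 K 1).foldl
        (fun v i => incAt v (PySem.List.pyGetD p i 0).toNat)
        (List.replicate N.toNat (0 : Int)) = cvf 0 N.toNat p := by
    intro p hp
    have hlen : p.length = K.toNat := pyCWR_mem_length _ _ p hp
    have hb : ∀ x ∈ p, 0 ≤ x ∧ x.toNat < N.toNat := by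
      intro x hx
      have := PySem.List.mem_pyRange_one.1 (pyCWR_mem_mem _ _ p hp x hx)
      omega
    have hKl : K = (p.length : Int) := by omega
    rw [hKl]
    have hfold := PySem.List.foldl_pyRange_pyGetD (a := 0) (xs := p) (d := (0 : Int))
      (f := fun v x => incAt v x.toNat)
      (init := List.replicate N.toNat (0 : Int)) (by omega)
    simp only [PySem.List.len_eq] at hfold
    rw [hfold]
    simpa using row_eq_cvf N.toNat p hb
  rw [List.map_congr_left hrow, pyRange_toNat]
  have h := map_cvf_pyCWR N.toNat 0 K.toNat
  rw [zero_add, Int.toNat_of_nonneg hK] at h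
  rw [h, genB2_eq_genB K.toNat K le_rfl N.toNat]
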